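-- pv_equiv track=rewrite | github.com/ggmz8686-ops/-A | smart_learning_assistant_package/src/language.py | polish_text
-- ===== SOURCE A (Python) =====
-- from typing import Dict, List, Any
--
-- def polish_text(text: str, errors: List[Dict[str, Any]]) -> str:
--     """
--     润色文本
--
--     Args:
--         text: 原始文本
--         errors: 错误列表
--
--     Returns:
--         润色后的文本
--     """
--     polished = text
--
--     # 修正常见错误
--     corrections = {
--         'He have': 'He has',
--         'She have': 'She has',
--         'It have': 'It has',
--         'recieve': 'receive',
--         'seperate': 'separate',
--         'definately': 'definitely',
--         'occured': 'occurred',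
--         'untill': 'until'
--     }
--
--     for error, correction in corrections.items():
--         polished = polished.replace(error, correction)
--
--     return polished
-- ===== SOURCE B (Python) =====
-- from typing import Dict, List, Any
--
-- _CORRECTIONS = [
--     ('He have', 'He has'),
--     ('She have', 'She has'),
--     ('It have', 'It has'),
--     ('recieve', 'receive'),
--     ('seperate', 'separate'),
--     ('definately', 'definitely'),
--     ('occured', 'occurred'),
--     ('untill', 'until'),
-- ]
--
-- def polish_text(text: str, errors: List[Dict[str, Any]]) -> str:
--     # Single left-to-right scan: at each position replace the first listed
--     # correction key that matches, instead of eight sequential replace passes.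
--     out = []
--     i = 0
--     n = len(text)
--     while i < n:
--         for err, corr in _CORRECTIONS:
--             if text.startswith(err, i):
--                 out.append(corr)
--                 i += len(err)
--                 break
--         else:
--             out.append(text[i])
--             i += 1
--     return ''.join(out)
-- ===== Notes on version B (the rewrite author's own statement) =====
-- stated objective: alternative
-- what changed: B makes a single left-to-right scan over the text, emitting at each position the first matching correction (or the character), instead of A's eight sequential full-string str.replace passes.
-- outside the precondition, e.g. on polish_text('occuredefinately', []): A returns 'occurredefinitely', B returns 'occurredefinately'; on polish_text('He haveeperate', []): A returns 'He haseparate', B returns 'He haseperate'; on polish_text('She haveeperate', []): A returns 'She haseparate', B returns 'She haseperate'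
import Mathlib
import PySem

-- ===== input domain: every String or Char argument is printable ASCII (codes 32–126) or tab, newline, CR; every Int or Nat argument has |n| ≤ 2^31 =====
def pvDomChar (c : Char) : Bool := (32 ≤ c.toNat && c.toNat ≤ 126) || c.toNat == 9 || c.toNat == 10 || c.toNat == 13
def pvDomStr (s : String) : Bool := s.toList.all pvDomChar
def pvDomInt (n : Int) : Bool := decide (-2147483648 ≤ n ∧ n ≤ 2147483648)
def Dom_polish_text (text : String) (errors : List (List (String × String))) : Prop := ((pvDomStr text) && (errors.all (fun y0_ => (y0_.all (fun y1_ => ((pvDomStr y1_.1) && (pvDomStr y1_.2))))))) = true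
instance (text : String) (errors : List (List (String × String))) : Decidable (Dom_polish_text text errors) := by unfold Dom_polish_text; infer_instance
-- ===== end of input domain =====

-- B replaces A's eight sequential full-string replace passes by a single left-to-right scan
-- that substitutes the first matching correction at each position (objective: alternative).
-- Pre_ excludes texts where correction sites overlap or one fix creates another's trigger,
-- where A's cascading pass order is accidental.


-- ===== PORT A =====
-- literal transliteration of A: a dict of eight corrections, then one full-string
-- str.replace pass per correction, in dict insertion order ('errors' is unused, as in A)
def polish_text (text : String) (errors : List (List (String × String))) : String :=
  let polished := text
  let corrections : PySem.Dict String String := PySem.Dict.ofList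
    [("He have", "He has"), ("She have", "She has"), ("It have", "It has"),
     ("recieve", "receive"), ("seperate", "separate"), ("definately", "definitely"),
     ("occured", "occurred"), ("untill", "until")]
  (PySem.Dict.items corrections).foldl (fun polished ec => PySem.Str.replace polished ec.1 ec.2) polished

-- ===== PORT B =====
-- termination fact used by the scan below
theorem pvDropLt (k cs : List Char) (h : k.isPrefixOf cs = true) (hk : 0 < k.length) :
    cs.length - k.length < cs.length := by
  have := (List.isPrefixOf_iff_prefix.mp h).length_le
  omega

-- port of B's while-loop: one left-to-right scan over the characters; at each position the
-- inner for-loop over the eight literal corrections (unrolled here) emits the first matching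
-- correction and skips its key, otherwise the character is copied ('out'/''.join is emitted directly)
def polishScan (cs : List Char) : List Char :=
  if h1 : ("He have".toList).isPrefixOf cs then "He has".toList ++ polishScan (cs.drop "He have".toList.length)
  else if h2 : ("She have".toList).isPrefixOf cs then "She has".toList ++ polishScan (cs.drop "She have".toList.length)
  else if h3 : ("It have".toList).isPrefixOf cs then "It has".toList ++ polishScan (cs.drop "It have".toList.length)
  else if h4 : ("recieve".toList).isPrefixOf cs then "receive".toList ++ polishScan (cs.drop "recieve".toList.length)
  else if h5 : ("seperate".toList).isPrefixOf cs then "separate".toList ++ polishScan (cs.drop "seperate".toList.length)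
  else if h6 : ("definately".toList).isPrefixOf cs then "definitely".toList ++ polishScan (cs.drop "definately".toList.length)
  else if h7 : ("occured".toList).isPrefixOf cs then "occurred".toList ++ polishScan (cs.drop "occured".toList.length)
  else if h8 : ("untill".toList).isPrefixOf cs then "until".toList ++ polishScan (cs.drop "untill".toList.length)
  else match cs with
    | [] => []
    | a :: t => a :: polishScan t
termination_by cs.length
decreasing_by
  all_goals first
    | (simp only [List.length_drop]; exact pvDropLt _ _ (by assumption) (by decide))
    | simp

def polish_text_alt (text : String) (errors : List (List (String × String))) : String :=
  String.ofList (polishScan text.toList)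

-- ===== PRECONDITION & SPEC =====
-- Pre_ excludes texts containing one of four substrings on which the eight sequential passes
-- interact (an earlier fix feeds or overlaps a later correction's trigger): there A's
-- cascading result and B's single-pass result are two equally accidental readings.
def Pre_polish_text (text : String) (errors : List (List (String × String))) : Prop :=
  PySem.Str.isIn "occuredefinately" text = false ∧
  PySem.Str.isIn "He haveeperate" text = false ∧
  PySem.Str.isIn "She haveeperate" text = false ∧
  PySem.Str.isIn "It haveeperate" text = false

instance (text : String) (errors : List (List (String × String))) : Decidable (Pre_polish_text text errors) := by
  unfold Pre_polish_text; infer_instance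

def pvWitness_polish_text : String × (List (List (String × String))) :=
  ("I definately recieved it untill now", [])

def Spec_polish_text (text : String) (errors : List (List (String × String))) (out : String) : Prop :=
  out = polish_text_alt text errors
instance (text : String) (errors : List (List (String × String))) (out : String) : Decidable (Spec_polish_text text errors out) := by unfold Spec_polish_text; infer_instance

-- ===== CLAIM (what is proved, stated in full; the proofs are below) =====
def Claim_equal_polish_text : Prop := ∀ (text : String) (errors : List (List (String × String))), Dom_polish_text text errors → Pre_polish_text text errors → Spec_polish_text text errors (polish_text text errors)

-- ===== LEMMAS AND PROOFS =====

-- abbreviation: Python's s.replace(k, c) on char lists, arguments in (key, replacement, subject) order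
def rep (k c u : List Char) : List Char := PySem.Chars.replace u k c

theorem go_zero (k c u acc : List Char) : PySem.Chars.replace.go k c 0 u acc = acc.reverse ++ u := rfl

theorem go_nil (k c : List Char) (f : Nat) (acc : List Char) :
    PySem.Chars.replace.go k c f [] acc = acc.reverse := by
  cases f
  · simp [go_zero]
  · rfl

theorem go_cons (k c : List Char) (f : Nat) (a : Char) (t acc : List Char) :
    PySem.Chars.replace.go k c (f+1) (a::t) acc =
      if k.isPrefixOf (a::t) then PySem.Chars.replace.go k c f ((a::t).drop k.length) (c.reverse ++ acc)
      else PySem.Chars.replace.go k c f t (a::acc) := rfl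

theorem go_acc (k c : List Char) (fuel : Nat) (u acc : List Char) :
    PySem.Chars.replace.go k c fuel u acc = acc.reverse ++ PySem.Chars.replace.go k c fuel u [] := by
  induction fuel generalizing u acc with
  | zero => simp [go_zero]
  | succ f ih =>
    cases u with
    | nil => simp [go_nil]
    | cons a t =>
      rw [go_cons, go_cons]
      by_cases h : k.isPrefixOf (a :: t)
      · rw [if_pos h, if_pos h, ih (List.drop k.length (a :: t)) (c.reverse ++ acc),
          ih (List.drop k.length (a :: t)) (c.reverse ++ [])]
        simp
      · rw [if_neg h, if_neg h, ih t [a], ih t (a :: acc)]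
        simp

theorem go_fuel (k c : List Char) (hk : k ≠ []) :
    ∀ f1 f2 u, u.length ≤ f1 → u.length ≤ f2 →
    PySem.Chars.replace.go k c f1 u [] = PySem.Chars.replace.go k c f2 u [] := by
  intro f1
  induction f1 using Nat.strong_induction_on with
  | _ f1 ih =>
    intro f2 u h1 h2
    cases u with
    | nil => simp [go_nil]
    | cons a t =>
      rcases f1 with _ | f1
      · simp at h1
      rcases f2 with _ | f2
      · simp at h2
      rw [go_cons, go_cons]
      by_cases h : k.isPrefixOf (a :: t)
      · rw [if_pos h, if_pos h]
        have hkl : k.length ≤ (a :: t).length := (List.isPrefixOf_iff_prefix.mp h).length_le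
        have hk1 : 0 < k.length := List.length_pos_iff.mpr hk
        rw [go_acc, go_acc k c f2]
        congr 1
        exact ih f1 (by omega) f2 ((a :: t).drop k.length) (by simp at hkl h1 ⊢; omega) (by simp at hkl h2 ⊢; omega)
      · rw [if_neg h, if_neg h]
        rw [go_acc, go_acc k c f2]
        congr 1
        exact ih f1 (by omega) f2 t (by simpa using h1) (by simpa using h2)

theorem rep_eq_go (k c u : List Char) (hk : k ≠ []) :
    rep k c u = PySem.Chars.replace.go k c u.length u [] := by
  simp [rep, PySem.Chars.replace, hk]

theorem rep_nil (k c : List Char) (hk : k ≠ []) : rep k c [] = [] := by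
  rw [rep_eq_go _ _ _ hk]; simp [go_nil]

theorem rep_match (k c u : List Char) (hk : k ≠ []) (h : k <+: u) :
    rep k c u = c ++ rep k c (u.drop k.length) := by
  have hkl : k.length ≤ u.length := h.length_le
  have hk1 : 0 < k.length := List.length_pos_iff.mpr hk
  cases u with
  | nil => exact absurd (List.prefix_nil.mp h) hk
  | cons a t =>
    rw [rep_eq_go _ _ _ hk, rep_eq_go _ _ _ hk]
    simp only [List.length_cons]
    rw [go_cons, if_pos (List.isPrefixOf_iff_prefix.mpr h), go_acc]
    simp only [List.reverse_reverse, List.append_nil]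
    congr 1
    exact go_fuel k c hk _ _ _ (by simp at hkl ⊢; omega) (le_refl _)

theorem rep_step (k c : List Char) (a : Char) (t : List Char) (hk : k ≠ [])
    (h : ¬ k <+: (a :: t)) : rep k c (a :: t) = a :: rep k c t := by
  rw [rep_eq_go _ _ _ hk, rep_eq_go _ _ _ hk]
  simp only [List.length_cons]
  rw [go_cons, if_neg (fun hh => h (List.isPrefixOf_iff_prefix.mp hh)), go_acc]
  simp

theorem prefix_append_cases {w y x : List Char} (h : w <+: y ++ x) : w <+: y ∨ y <+: w :=
  List.prefix_or_prefix_of_prefix h (List.prefix_append y x)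

theorem rep_skip (k c : List Char) (hk : k ≠ []) :
    ∀ (m : Nat) (u : List Char), (∀ p < m, ¬ k <+: u.drop p) →
    rep k c u = u.take m ++ rep k c (u.drop m) := by
  intro m
  induction m with
  | zero => simp
  | succ n ih =>
    intro u h
    cases u with
    | nil => simp
    | cons a t =>
      rw [rep_step k c a t hk (by simpa using h 0 (by omega))]
      rw [ih t (fun p hp => by simpa using h (p+1) (by omega))]
      simp

theorem rep_pull (k c : List Char) (hk : k ≠ []) :
    ∀ (u w : List Char), (∀ p < w.length, ¬ c <+: w.drop p) → w <+: rep k c u →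
    w <+: u ∨ ∃ p < w.length, w.drop p <+: c ∧ (w.take p ++ k) <+: u := by
  intro u
  induction hn : u.length using Nat.strong_induction_on generalizing u with
  | _ n ih =>
    subst hn
    intro w hw hpre
    cases u with
    | nil =>
      rw [rep_nil _ _ hk] at hpre
      left; exact hpre
    | cons a t =>
      by_cases hm : k <+: (a :: t)
      · rw [rep_match _ _ _ hk hm] at hpre
        rcases w with _ | ⟨b, w'⟩
        · left; exact List.nil_prefix
        · rcases prefix_append_cases hpre with hc | hc
          · right
            exact ⟨0, by simp, by simpa using hc, by simpa using hm⟩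
          · exact absurd hc (by simpa using hw 0 (by simp))
      · rw [rep_step _ _ _ _ hk hm] at hpre
        rcases w with _ | ⟨b, w'⟩
        · left; exact List.nil_prefix
        · obtain ⟨hb, hw'⟩ := by simpa using hpre
          subst hb
          rcases ih t.length (by simp) t rfl w' (fun p hp => by simpa using hw (p+1) (by simpa using hp)) hw' with h1 | ⟨p, hp, h2, h3⟩
          · left; simpa using h1
          · right
            exact ⟨p+1, by simpa using hp, by simpa using h2, by simpa using h3⟩

-- clean skip: a key that matches nowhere against a concrete block passes over it
theorem skip_clean (k c base : List Char) (hk : k ≠ [])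
    (h : ∀ p < base.length, ¬ k <+: base.drop p ∧ ¬ base.drop p <+: k) (x : List Char) :
    rep k c (base ++ x) = base ++ rep k c x := by
  rw [rep_skip k c hk base.length (base ++ x) ?_]
  · simp
  · intro p hp hpre
    rw [List.drop_append_of_le_length (by omega)] at hpre
    rcases prefix_append_cases hpre with hc | hc
    · exact (h p hp).1 hc
    · exact (h p hp).2 hc

-- skip with one exceptional overlap position, ruled out by a side hypothesis on x
theorem skip_exc (k c base w : List Char) (hk : k ≠ [])
    (h : ∀ p < base.length, ¬ k <+: base.drop p ∧ (base.drop p <+: k → base.drop p ++ w = k))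
    (x : List Char) (hx : ¬ w <+: x) :
    rep k c (base ++ x) = base ++ rep k c x := by
  rw [rep_skip k c hk base.length (base ++ x) ?_]
  · simp
  · intro p hp hpre
    rw [List.drop_append_of_le_length (by omega)] at hpre
    rcases prefix_append_cases hpre with hc | hc
    · exact (h p hp).1 hc
    · have heq := (h p hp).2 hc
      rw [← heq] at hpre
      exact hx ((List.prefix_append_right_inj _).mp hpre)

-- clean pullback: if w survives nowhere against c, a prefix w of the output was already there
theorem pull_clean (k c w : List Char) (hk : k ≠ [])
    (h : ∀ p < w.length, ¬ c <+: w.drop p ∧ ¬ w.drop p <+: c) (u : List Char)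
    (hpre : w <+: rep k c u) : w <+: u := by
  rcases rep_pull k c hk u w (fun p hp => (h p hp).1) hpre with h1 | ⟨p, hp, h2, _⟩
  · exact h1
  · exact absurd h2 (h p hp).2

-- pullback with one exceptional position p0 producing the longer pattern w.take p0 ++ k
theorem pull_exc (k c w w2 : List Char) (hk : k ≠ [])
    (h : ∀ p < w.length, ¬ c <+: w.drop p ∧ (w.drop p <+: c → w.take p ++ k = w2)) (u : List Char)
    (hpre : w <+: rep k c u) : w <+: u ∨ w2 <+: u := by
  rcases rep_pull k c hk u w (fun p hp => (h p hp).1) hpre with h1 | ⟨p, hp, h2, h3⟩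
  · left; exact h1
  · right; rw [← (h p hp).2 h2]; exact h3

-- the four correction keys as char lists
abbrev K1 : List Char := "He have".toList
abbrev K2 : List Char := "She have".toList
abbrev K3 : List Char := "It have".toList
abbrev K4 : List Char := "recieve".toList
abbrev K5 : List Char := "seperate".toList
abbrev K6 : List Char := "definately".toList
abbrev K7 : List Char := "occured".toList
abbrev K8 : List Char := "untill".toList
abbrev C1 : List Char := "He has".toList
abbrev C2 : List Char := "She has".toList
abbrev C3 : List Char := "It has".toList
abbrev C4 : List Char := "receive".toList
abbrev C5 : List Char := "separate".toList
abbrev C6 : List Char := "definitely".toList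
abbrev C7 : List Char := "occurred".toList
abbrev C8 : List Char := "until".toList

-- A's eight passes on char lists
def Acore (u : List Char) : List Char :=
  rep K8 C8 (rep K7 C7 (rep K6 C6 (rep K5 C5 (rep K4 C4 (rep K3 C3 (rep K2 C2 (rep K1 C1 u)))))))

-- the interaction patterns excluded by Pre_, on char lists
def Good (cs : List Char) : Prop :=
  ¬ "occuredefinately".toList <:+: cs ∧ ¬ "He haveeperate".toList <:+: cs ∧
  ¬ "She haveeperate".toList <:+: cs ∧ ¬ "It haveeperate".toList <:+: cs

theorem Good_mono {u cs : List Char} (h : Good cs) (hs : u <:+: cs) : Good u :=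
  ⟨fun hc => h.1 (hc.trans hs), fun hc => h.2.1 (hc.trans hs),
   fun hc => h.2.2.1 (hc.trans hs), fun hc => h.2.2.2 (hc.trans hs)⟩

theorem scan1 (cs : List Char)  (h1 : K1 <+: cs) :
    polishScan cs = C1 ++ polishScan (cs.drop K1.length) := by
  rw [polishScan.eq_def, dif_pos (List.isPrefixOf_iff_prefix.mpr h1)]

theorem scan2 (cs : List Char) (h1 : ¬ K1 <+: cs) (h2 : K2 <+: cs) :
    polishScan cs = C2 ++ polishScan (cs.drop K2.length) := by
  rw [polishScan.eq_def, dif_neg (fun hh => h1 (List.isPrefixOf_iff_prefix.mp hh)), dif_pos (List.isPrefixOf_iff_prefix.mpr h2)]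

theorem scan3 (cs : List Char) (h1 : ¬ K1 <+: cs) (h2 : ¬ K2 <+: cs) (h3 : K3 <+: cs) :
    polishScan cs = C3 ++ polishScan (cs.drop K3.length) := by
  rw [polishScan.eq_def, dif_neg (fun hh => h1 (List.isPrefixOf_iff_prefix.mp hh)), dif_neg (fun hh => h2 (List.isPrefixOf_iff_prefix.mp hh)), dif_pos (List.isPrefixOf_iff_prefix.mpr h3)]

theorem scan4 (cs : List Char) (h1 : ¬ K1 <+: cs) (h2 : ¬ K2 <+: cs) (h3 : ¬ K3 <+: cs) (h4 : K4 <+: cs) :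
    polishScan cs = C4 ++ polishScan (cs.drop K4.length) := by
  rw [polishScan.eq_def, dif_neg (fun hh => h1 (List.isPrefixOf_iff_prefix.mp hh)), dif_neg (fun hh => h2 (List.isPrefixOf_iff_prefix.mp hh)), dif_neg (fun hh => h3 (List.isPrefixOf_iff_prefix.mp hh)), dif_pos (List.isPrefixOf_iff_prefix.mpr h4)]

theorem scan5 (cs : List Char) (h1 : ¬ K1 <+: cs) (h2 : ¬ K2 <+: cs) (h3 : ¬ K3 <+: cs) (h4 : ¬ K4 <+: cs) (h5 : K5 <+: cs) :
    polishScan cs = C5 ++ polishScan (cs.drop K5.length) := by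
  rw [polishScan.eq_def, dif_neg (fun hh => h1 (List.isPrefixOf_iff_prefix.mp hh)), dif_neg (fun hh => h2 (List.isPrefixOf_iff_prefix.mp hh)), dif_neg (fun hh => h3 (List.isPrefixOf_iff_prefix.mp hh)), dif_neg (fun hh => h4 (List.isPrefixOf_iff_prefix.mp hh)), dif_pos (List.isPrefixOf_iff_prefix.mpr h5)]

theorem scan6 (cs : List Char) (h1 : ¬ K1 <+: cs) (h2 : ¬ K2 <+: cs) (h3 : ¬ K3 <+: cs) (h4 : ¬ K4 <+: cs) (h5 : ¬ K5 <+: cs) (h6 : K6 <+: cs) :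
    polishScan cs = C6 ++ polishScan (cs.drop K6.length) := by
  rw [polishScan.eq_def, dif_neg (fun hh => h1 (List.isPrefixOf_iff_prefix.mp hh)), dif_neg (fun hh => h2 (List.isPrefixOf_iff_prefix.mp hh)), dif_neg (fun hh => h3 (List.isPrefixOf_iff_prefix.mp hh)), dif_neg (fun hh => h4 (List.isPrefixOf_iff_prefix.mp hh)), dif_neg (fun hh => h5 (List.isPrefixOf_iff_prefix.mp hh)), dif_pos (List.isPrefixOf_iff_prefix.mpr h6)]

theorem scan7 (cs : List Char) (h1 : ¬ K1 <+: cs) (h2 : ¬ K2 <+: cs) (h3 : ¬ K3 <+: cs) (h4 : ¬ K4 <+: cs) (h5 : ¬ K5 <+: cs) (h6 : ¬ K6 <+: cs) (h7 : K7 <+: cs) :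
    polishScan cs = C7 ++ polishScan (cs.drop K7.length) := by
  rw [polishScan.eq_def, dif_neg (fun hh => h1 (List.isPrefixOf_iff_prefix.mp hh)), dif_neg (fun hh => h2 (List.isPrefixOf_iff_prefix.mp hh)), dif_neg (fun hh => h3 (List.isPrefixOf_iff_prefix.mp hh)), dif_neg (fun hh => h4 (List.isPrefixOf_iff_prefix.mp hh)), dif_neg (fun hh => h5 (List.isPrefixOf_iff_prefix.mp hh)), dif_neg (fun hh => h6 (List.isPrefixOf_iff_prefix.mp hh)), dif_pos (List.isPrefixOf_iff_prefix.mpr h7)]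

theorem scan8 (cs : List Char) (h1 : ¬ K1 <+: cs) (h2 : ¬ K2 <+: cs) (h3 : ¬ K3 <+: cs) (h4 : ¬ K4 <+: cs) (h5 : ¬ K5 <+: cs) (h6 : ¬ K6 <+: cs) (h7 : ¬ K7 <+: cs) (h8 : K8 <+: cs) :
    polishScan cs = C8 ++ polishScan (cs.drop K8.length) := by
  rw [polishScan.eq_def, dif_neg (fun hh => h1 (List.isPrefixOf_iff_prefix.mp hh)), dif_neg (fun hh => h2 (List.isPrefixOf_iff_prefix.mp hh)), dif_neg (fun hh => h3 (List.isPrefixOf_iff_prefix.mp hh)), dif_neg (fun hh => h4 (List.isPrefixOf_iff_prefix.mp hh)), dif_neg (fun hh => h5 (List.isPrefixOf_iff_prefix.mp hh)), dif_neg (fun hh => h6 (List.isPrefixOf_iff_prefix.mp hh)), dif_neg (fun hh => h7 (List.isPrefixOf_iff_prefix.mp hh)), dif_pos (List.isPrefixOf_iff_prefix.mpr h8)]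

theorem scan_char (a : Char) (t : List Char) (h1 : ¬ K1 <+: (a :: t)) (h2 : ¬ K2 <+: (a :: t)) (h3 : ¬ K3 <+: (a :: t)) (h4 : ¬ K4 <+: (a :: t)) (h5 : ¬ K5 <+: (a :: t)) (h6 : ¬ K6 <+: (a :: t)) (h7 : ¬ K7 <+: (a :: t)) (h8 : ¬ K8 <+: (a :: t)) :
    polishScan (a :: t) = a :: polishScan t := by
  rw [polishScan.eq_def, dif_neg (fun hh => h1 (List.isPrefixOf_iff_prefix.mp hh)), dif_neg (fun hh => h2 (List.isPrefixOf_iff_prefix.mp hh)), dif_neg (fun hh => h3 (List.isPrefixOf_iff_prefix.mp hh)), dif_neg (fun hh => h4 (List.isPrefixOf_iff_prefix.mp hh)), dif_neg (fun hh => h5 (List.isPrefixOf_iff_prefix.mp hh)), dif_neg (fun hh => h6 (List.isPrefixOf_iff_prefix.mp hh)), dif_neg (fun hh => h7 (List.isPrefixOf_iff_prefix.mp hh)), dif_neg (fun hh => h8 (List.isPrefixOf_iff_prefix.mp hh))]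

theorem scan_nil : polishScan [] = [] := by
  rw [polishScan.eq_def, dif_neg (by decide), dif_neg (by decide), dif_neg (by decide), dif_neg (by decide), dif_neg (by decide), dif_neg (by decide), dif_neg (by decide), dif_neg (by decide)]

theorem main : ∀ (n : Nat) (cs : List Char), cs.length ≤ n → Good cs → Acore cs = polishScan cs := by
  intro n
  induction n with
  | zero =>
    intro cs hn _g
    have : cs = [] := List.eq_nil_of_length_eq_zero (by omega)
    subst this
    unfold Acore
    rw [rep_nil K1 C1 (by decide), rep_nil K2 C2 (by decide), rep_nil K3 C3 (by decide), rep_nil K4 C4 (by decide), rep_nil K5 C5 (by decide), rep_nil K6 C6 (by decide), rep_nil K7 C7 (by decide), rep_nil K8 C8 (by decide), scan_nil]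
  | succ n ih =>
    intro cs hn g
    by_cases h1 : K1 <+: cs
    · rcases h1 with ⟨u, rfl⟩
      have hgu : Good u := Good_mono g (List.suffix_append K1 u).isInfix
      have hlen : u.length ≤ n := by simp [K1] at hn; omega
      have hw0 : ¬ ("eperate".toList <+: u) := by
        intro hc
        refine g.2.1 (List.IsPrefix.isInfix ?_)
        rw [show "He haveeperate".toList = K1 ++ "eperate".toList from by decide]
        exact (List.prefix_append_right_inj K1).mpr hc
      have hw1 : ¬ ("eperate".toList <+: rep K1 C1 (u)) := fun hc => hw0 (pull_clean K1 C1 _ (by decide) (by decide) _ hc)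
      have hw2 : ¬ ("eperate".toList <+: rep K2 C2 (rep K1 C1 (u))) := fun hc => hw1 (pull_clean K2 C2 _ (by decide) (by decide) _ hc)
      have hw3 : ¬ ("eperate".toList <+: rep K3 C3 (rep K2 C2 (rep K1 C1 (u)))) := fun hc => hw2 (pull_clean K3 C3 _ (by decide) (by decide) _ hc)
      have hw4 : ¬ ("eperate".toList <+: rep K4 C4 (rep K3 C3 (rep K2 C2 (rep K1 C1 (u))))) := fun hc => hw3 (pull_clean K4 C4 _ (by decide) (by decide) _ hc)
      have e1 : rep K1 C1 (K1 ++ u) = C1 ++ rep K1 C1 (u) := by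
        rw [rep_match K1 C1 _ (by decide) (List.prefix_append _ _), List.drop_left]
      have e2 : rep K2 C2 (C1 ++ rep K1 C1 (u)) = C1 ++ rep K2 C2 (rep K1 C1 (u)) := skip_clean K2 C2 C1 (by decide) (by decide) _
      have e3 : rep K3 C3 (C1 ++ rep K2 C2 (rep K1 C1 (u))) = C1 ++ rep K3 C3 (rep K2 C2 (rep K1 C1 (u))) := skip_clean K3 C3 C1 (by decide) (by decide) _
      have e4 : rep K4 C4 (C1 ++ rep K3 C3 (rep K2 C2 (rep K1 C1 (u)))) = C1 ++ rep K4 C4 (rep K3 C3 (rep K2 C2 (rep K1 C1 (u)))) := skip_clean K4 C4 C1 (by decide) (by decide) _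
      have e5 : rep K5 C5 (C1 ++ rep K4 C4 (rep K3 C3 (rep K2 C2 (rep K1 C1 (u))))) = C1 ++ rep K5 C5 (rep K4 C4 (rep K3 C3 (rep K2 C2 (rep K1 C1 (u))))) := skip_exc K5 C5 C1 ("eperate".toList) (by decide) (by decide) _ hw4
      have e6 : rep K6 C6 (C1 ++ rep K5 C5 (rep K4 C4 (rep K3 C3 (rep K2 C2 (rep K1 C1 (u)))))) = C1 ++ rep K6 C6 (rep K5 C5 (rep K4 C4 (rep K3 C3 (rep K2 C2 (rep K1 C1 (u)))))) := skip_clean K6 C6 C1 (by decide) (by decide) _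
      have e7 : rep K7 C7 (C1 ++ rep K6 C6 (rep K5 C5 (rep K4 C4 (rep K3 C3 (rep K2 C2 (rep K1 C1 (u))))))) = C1 ++ rep K7 C7 (rep K6 C6 (rep K5 C5 (rep K4 C4 (rep K3 C3 (rep K2 C2 (rep K1 C1 (u))))))) := skip_clean K7 C7 C1 (by decide) (by decide) _
      have e8 : rep K8 C8 (C1 ++ rep K7 C7 (rep K6 C6 (rep K5 C5 (rep K4 C4 (rep K3 C3 (rep K2 C2 (rep K1 C1 (u)))))))) = C1 ++ rep K8 C8 (rep K7 C7 (rep K6 C6 (rep K5 C5 (rep K4 C4 (rep K3 C3 (rep K2 C2 (rep K1 C1 (u)))))))) := skip_clean K8 C8 C1 (by decide) (by decide) _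
      have hscan : polishScan (K1 ++ u) = C1 ++ polishScan u := by
        rw [scan1 _  (List.prefix_append _ _), List.drop_left]
      have hu := ih u hlen hgu
      unfold Acore at hu ⊢
      rw [e1, e2, e3, e4, e5, e6, e7, e8, hu, hscan]
    by_cases h2 : K2 <+: cs
    · rcases h2 with ⟨u, rfl⟩
      have hgu : Good u := Good_mono g (List.suffix_append K2 u).isInfix
      have hlen : u.length ≤ n := by simp [K2] at hn; omega
      have hw0 : ¬ ("eperate".toList <+: u) := by
        intro hc
        refine g.2.2.1 (List.IsPrefix.isInfix ?_)
        rw [show "She haveeperate".toList = K2 ++ "eperate".toList from by decide]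
        exact (List.prefix_append_right_inj K2).mpr hc
      have hw1 : ¬ ("eperate".toList <+: rep K1 C1 (u)) := fun hc => hw0 (pull_clean K1 C1 _ (by decide) (by decide) _ hc)
      have hw2 : ¬ ("eperate".toList <+: rep K2 C2 (rep K1 C1 (u))) := fun hc => hw1 (pull_clean K2 C2 _ (by decide) (by decide) _ hc)
      have hw3 : ¬ ("eperate".toList <+: rep K3 C3 (rep K2 C2 (rep K1 C1 (u)))) := fun hc => hw2 (pull_clean K3 C3 _ (by decide) (by decide) _ hc)
      have hw4 : ¬ ("eperate".toList <+: rep K4 C4 (rep K3 C3 (rep K2 C2 (rep K1 C1 (u))))) := fun hc => hw3 (pull_clean K4 C4 _ (by decide) (by decide) _ hc)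
      have e1 : rep K1 C1 (K2 ++ u) = K2 ++ rep K1 C1 (u) := skip_clean K1 C1 K2 (by decide) (by decide) _
      have e2 : rep K2 C2 (K2 ++ rep K1 C1 (u)) = C2 ++ rep K2 C2 (rep K1 C1 (u)) := by
        rw [rep_match K2 C2 _ (by decide) (List.prefix_append _ _), List.drop_left]
      have e3 : rep K3 C3 (C2 ++ rep K2 C2 (rep K1 C1 (u))) = C2 ++ rep K3 C3 (rep K2 C2 (rep K1 C1 (u))) := skip_clean K3 C3 C2 (by decide) (by decide) _
      have e4 : rep K4 C4 (C2 ++ rep K3 C3 (rep K2 C2 (rep K1 C1 (u)))) = C2 ++ rep K4 C4 (rep K3 C3 (rep K2 C2 (rep K1 C1 (u)))) := skip_clean K4 C4 C2 (by decide) (by decide) _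
      have e5 : rep K5 C5 (C2 ++ rep K4 C4 (rep K3 C3 (rep K2 C2 (rep K1 C1 (u))))) = C2 ++ rep K5 C5 (rep K4 C4 (rep K3 C3 (rep K2 C2 (rep K1 C1 (u))))) := skip_exc K5 C5 C2 ("eperate".toList) (by decide) (by decide) _ hw4
      have e6 : rep K6 C6 (C2 ++ rep K5 C5 (rep K4 C4 (rep K3 C3 (rep K2 C2 (rep K1 C1 (u)))))) = C2 ++ rep K6 C6 (rep K5 C5 (rep K4 C4 (rep K3 C3 (rep K2 C2 (rep K1 C1 (u)))))) := skip_clean K6 C6 C2 (by decide) (by decide) _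
      have e7 : rep K7 C7 (C2 ++ rep K6 C6 (rep K5 C5 (rep K4 C4 (rep K3 C3 (rep K2 C2 (rep K1 C1 (u))))))) = C2 ++ rep K7 C7 (rep K6 C6 (rep K5 C5 (rep K4 C4 (rep K3 C3 (rep K2 C2 (rep K1 C1 (u))))))) := skip_clean K7 C7 C2 (by decide) (by decide) _
      have e8 : rep K8 C8 (C2 ++ rep K7 C7 (rep K6 C6 (rep K5 C5 (rep K4 C4 (rep K3 C3 (rep K2 C2 (rep K1 C1 (u)))))))) = C2 ++ rep K8 C8 (rep K7 C7 (rep K6 C6 (rep K5 C5 (rep K4 C4 (rep K3 C3 (rep K2 C2 (rep K1 C1 (u)))))))) := skip_clean K8 C8 C2 (by decide) (by decide) _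
      have hscan : polishScan (K2 ++ u) = C2 ++ polishScan u := by
        rw [scan2 _ h1 (List.prefix_append _ _), List.drop_left]
      have hu := ih u hlen hgu
      unfold Acore at hu ⊢
      rw [e1, e2, e3, e4, e5, e6, e7, e8, hu, hscan]
    by_cases h3 : K3 <+: cs
    · rcases h3 with ⟨u, rfl⟩
      have hgu : Good u := Good_mono g (List.suffix_append K3 u).isInfix
      have hlen : u.length ≤ n := by simp [K3] at hn; omega
      have hw0 : ¬ ("eperate".toList <+: u) := by
        intro hc
        refine g.2.2.2 (List.IsPrefix.isInfix ?_)
        rw [show "It haveeperate".toList = K3 ++ "eperate".toList from by decide]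
        exact (List.prefix_append_right_inj K3).mpr hc
      have hw1 : ¬ ("eperate".toList <+: rep K1 C1 (u)) := fun hc => hw0 (pull_clean K1 C1 _ (by decide) (by decide) _ hc)
      have hw2 : ¬ ("eperate".toList <+: rep K2 C2 (rep K1 C1 (u))) := fun hc => hw1 (pull_clean K2 C2 _ (by decide) (by decide) _ hc)
      have hw3 : ¬ ("eperate".toList <+: rep K3 C3 (rep K2 C2 (rep K1 C1 (u)))) := fun hc => hw2 (pull_clean K3 C3 _ (by decide) (by decide) _ hc)
      have hw4 : ¬ ("eperate".toList <+: rep K4 C4 (rep K3 C3 (rep K2 C2 (rep K1 C1 (u))))) := fun hc => hw3 (pull_clean K4 C4 _ (by decide) (by decide) _ hc)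
      have e1 : rep K1 C1 (K3 ++ u) = K3 ++ rep K1 C1 (u) := skip_clean K1 C1 K3 (by decide) (by decide) _
      have e2 : rep K2 C2 (K3 ++ rep K1 C1 (u)) = K3 ++ rep K2 C2 (rep K1 C1 (u)) := skip_clean K2 C2 K3 (by decide) (by decide) _
      have e3 : rep K3 C3 (K3 ++ rep K2 C2 (rep K1 C1 (u))) = C3 ++ rep K3 C3 (rep K2 C2 (rep K1 C1 (u))) := by
        rw [rep_match K3 C3 _ (by decide) (List.prefix_append _ _), List.drop_left]
      have e4 : rep K4 C4 (C3 ++ rep K3 C3 (rep K2 C2 (rep K1 C1 (u)))) = C3 ++ rep K4 C4 (rep K3 C3 (rep K2 C2 (rep K1 C1 (u)))) := skip_clean K4 C4 C3 (by decide) (by decide) _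
      have e5 : rep K5 C5 (C3 ++ rep K4 C4 (rep K3 C3 (rep K2 C2 (rep K1 C1 (u))))) = C3 ++ rep K5 C5 (rep K4 C4 (rep K3 C3 (rep K2 C2 (rep K1 C1 (u))))) := skip_exc K5 C5 C3 ("eperate".toList) (by decide) (by decide) _ hw4
      have e6 : rep K6 C6 (C3 ++ rep K5 C5 (rep K4 C4 (rep K3 C3 (rep K2 C2 (rep K1 C1 (u)))))) = C3 ++ rep K6 C6 (rep K5 C5 (rep K4 C4 (rep K3 C3 (rep K2 C2 (rep K1 C1 (u)))))) := skip_clean K6 C6 C3 (by decide) (by decide) _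
      have e7 : rep K7 C7 (C3 ++ rep K6 C6 (rep K5 C5 (rep K4 C4 (rep K3 C3 (rep K2 C2 (rep K1 C1 (u))))))) = C3 ++ rep K7 C7 (rep K6 C6 (rep K5 C5 (rep K4 C4 (rep K3 C3 (rep K2 C2 (rep K1 C1 (u))))))) := skip_clean K7 C7 C3 (by decide) (by decide) _
      have e8 : rep K8 C8 (C3 ++ rep K7 C7 (rep K6 C6 (rep K5 C5 (rep K4 C4 (rep K3 C3 (rep K2 C2 (rep K1 C1 (u)))))))) = C3 ++ rep K8 C8 (rep K7 C7 (rep K6 C6 (rep K5 C5 (rep K4 C4 (rep K3 C3 (rep K2 C2 (rep K1 C1 (u)))))))) := skip_clean K8 C8 C3 (by decide) (by decide) _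
      have hscan : polishScan (K3 ++ u) = C3 ++ polishScan u := by
        rw [scan3 _ h1 h2 (List.prefix_append _ _), List.drop_left]
      have hu := ih u hlen hgu
      unfold Acore at hu ⊢
      rw [e1, e2, e3, e4, e5, e6, e7, e8, hu, hscan]
    by_cases h4 : K4 <+: cs
    · rcases h4 with ⟨u, rfl⟩
      have hgu : Good u := Good_mono g (List.suffix_append K4 u).isInfix
      have hlen : u.length ≤ n := by simp [K4] at hn; omega
      have e1 : rep K1 C1 (K4 ++ u) = K4 ++ rep K1 C1 (u) := skip_clean K1 C1 K4 (by decide) (by decide) _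
      have e2 : rep K2 C2 (K4 ++ rep K1 C1 (u)) = K4 ++ rep K2 C2 (rep K1 C1 (u)) := skip_clean K2 C2 K4 (by decide) (by decide) _
      have e3 : rep K3 C3 (K4 ++ rep K2 C2 (rep K1 C1 (u))) = K4 ++ rep K3 C3 (rep K2 C2 (rep K1 C1 (u))) := skip_clean K3 C3 K4 (by decide) (by decide) _
      have e4 : rep K4 C4 (K4 ++ rep K3 C3 (rep K2 C2 (rep K1 C1 (u)))) = C4 ++ rep K4 C4 (rep K3 C3 (rep K2 C2 (rep K1 C1 (u)))) := by
        rw [rep_match K4 C4 _ (by decide) (List.prefix_append _ _), List.drop_left]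
      have e5 : rep K5 C5 (C4 ++ rep K4 C4 (rep K3 C3 (rep K2 C2 (rep K1 C1 (u))))) = C4 ++ rep K5 C5 (rep K4 C4 (rep K3 C3 (rep K2 C2 (rep K1 C1 (u))))) := skip_clean K5 C5 C4 (by decide) (by decide) _
      have e6 : rep K6 C6 (C4 ++ rep K5 C5 (rep K4 C4 (rep K3 C3 (rep K2 C2 (rep K1 C1 (u)))))) = C4 ++ rep K6 C6 (rep K5 C5 (rep K4 C4 (rep K3 C3 (rep K2 C2 (rep K1 C1 (u)))))) := skip_clean K6 C6 C4 (by decide) (by decide) _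
      have e7 : rep K7 C7 (C4 ++ rep K6 C6 (rep K5 C5 (rep K4 C4 (rep K3 C3 (rep K2 C2 (rep K1 C1 (u))))))) = C4 ++ rep K7 C7 (rep K6 C6 (rep K5 C5 (rep K4 C4 (rep K3 C3 (rep K2 C2 (rep K1 C1 (u))))))) := skip_clean K7 C7 C4 (by decide) (by decide) _
      have e8 : rep K8 C8 (C4 ++ rep K7 C7 (rep K6 C6 (rep K5 C5 (rep K4 C4 (rep K3 C3 (rep K2 C2 (rep K1 C1 (u)))))))) = C4 ++ rep K8 C8 (rep K7 C7 (rep K6 C6 (rep K5 C5 (rep K4 C4 (rep K3 C3 (rep K2 C2 (rep K1 C1 (u)))))))) := skip_clean K8 C8 C4 (by decide) (by decide) _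
      have hscan : polishScan (K4 ++ u) = C4 ++ polishScan u := by
        rw [scan4 _ h1 h2 h3 (List.prefix_append _ _), List.drop_left]
      have hu := ih u hlen hgu
      unfold Acore at hu ⊢
      rw [e1, e2, e3, e4, e5, e6, e7, e8, hu, hscan]
    by_cases h5 : K5 <+: cs
    · rcases h5 with ⟨u, rfl⟩
      have hgu : Good u := Good_mono g (List.suffix_append K5 u).isInfix
      have hlen : u.length ≤ n := by simp [K5] at hn; omega
      have e1 : rep K1 C1 (K5 ++ u) = K5 ++ rep K1 C1 (u) := skip_clean K1 C1 K5 (by decide) (by decide) _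
      have e2 : rep K2 C2 (K5 ++ rep K1 C1 (u)) = K5 ++ rep K2 C2 (rep K1 C1 (u)) := skip_clean K2 C2 K5 (by decide) (by decide) _
      have e3 : rep K3 C3 (K5 ++ rep K2 C2 (rep K1 C1 (u))) = K5 ++ rep K3 C3 (rep K2 C2 (rep K1 C1 (u))) := skip_clean K3 C3 K5 (by decide) (by decide) _
      have e4 : rep K4 C4 (K5 ++ rep K3 C3 (rep K2 C2 (rep K1 C1 (u)))) = K5 ++ rep K4 C4 (rep K3 C3 (rep K2 C2 (rep K1 C1 (u)))) := skip_clean K4 C4 K5 (by decide) (by decide) _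
      have e5 : rep K5 C5 (K5 ++ rep K4 C4 (rep K3 C3 (rep K2 C2 (rep K1 C1 (u))))) = C5 ++ rep K5 C5 (rep K4 C4 (rep K3 C3 (rep K2 C2 (rep K1 C1 (u))))) := by
        rw [rep_match K5 C5 _ (by decide) (List.prefix_append _ _), List.drop_left]
      have e6 : rep K6 C6 (C5 ++ rep K5 C5 (rep K4 C4 (rep K3 C3 (rep K2 C2 (rep K1 C1 (u)))))) = C5 ++ rep K6 C6 (rep K5 C5 (rep K4 C4 (rep K3 C3 (rep K2 C2 (rep K1 C1 (u)))))) := skip_clean K6 C6 C5 (by decide) (by decide) _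
      have e7 : rep K7 C7 (C5 ++ rep K6 C6 (rep K5 C5 (rep K4 C4 (rep K3 C3 (rep K2 C2 (rep K1 C1 (u))))))) = C5 ++ rep K7 C7 (rep K6 C6 (rep K5 C5 (rep K4 C4 (rep K3 C3 (rep K2 C2 (rep K1 C1 (u))))))) := skip_clean K7 C7 C5 (by decide) (by decide) _
      have e8 : rep K8 C8 (C5 ++ rep K7 C7 (rep K6 C6 (rep K5 C5 (rep K4 C4 (rep K3 C3 (rep K2 C2 (rep K1 C1 (u)))))))) = C5 ++ rep K8 C8 (rep K7 C7 (rep K6 C6 (rep K5 C5 (rep K4 C4 (rep K3 C3 (rep K2 C2 (rep K1 C1 (u)))))))) := skip_clean K8 C8 C5 (by decide) (by decide) _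
      have hscan : polishScan (K5 ++ u) = C5 ++ polishScan u := by
        rw [scan5 _ h1 h2 h3 h4 (List.prefix_append _ _), List.drop_left]
      have hu := ih u hlen hgu
      unfold Acore at hu ⊢
      rw [e1, e2, e3, e4, e5, e6, e7, e8, hu, hscan]
    by_cases h6 : K6 <+: cs
    · rcases h6 with ⟨u, rfl⟩
      have hgu : Good u := Good_mono g (List.suffix_append K6 u).isInfix
      have hlen : u.length ≤ n := by simp [K6] at hn; omega
      have e1 : rep K1 C1 (K6 ++ u) = K6 ++ rep K1 C1 (u) := skip_clean K1 C1 K6 (by decide) (by decide) _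
      have e2 : rep K2 C2 (K6 ++ rep K1 C1 (u)) = K6 ++ rep K2 C2 (rep K1 C1 (u)) := skip_clean K2 C2 K6 (by decide) (by decide) _
      have e3 : rep K3 C3 (K6 ++ rep K2 C2 (rep K1 C1 (u))) = K6 ++ rep K3 C3 (rep K2 C2 (rep K1 C1 (u))) := skip_clean K3 C3 K6 (by decide) (by decide) _
      have e4 : rep K4 C4 (K6 ++ rep K3 C3 (rep K2 C2 (rep K1 C1 (u)))) = K6 ++ rep K4 C4 (rep K3 C3 (rep K2 C2 (rep K1 C1 (u)))) := skip_clean K4 C4 K6 (by decide) (by decide) _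
      have e5 : rep K5 C5 (K6 ++ rep K4 C4 (rep K3 C3 (rep K2 C2 (rep K1 C1 (u))))) = K6 ++ rep K5 C5 (rep K4 C4 (rep K3 C3 (rep K2 C2 (rep K1 C1 (u))))) := skip_clean K5 C5 K6 (by decide) (by decide) _
      have e6 : rep K6 C6 (K6 ++ rep K5 C5 (rep K4 C4 (rep K3 C3 (rep K2 C2 (rep K1 C1 (u)))))) = C6 ++ rep K6 C6 (rep K5 C5 (rep K4 C4 (rep K3 C3 (rep K2 C2 (rep K1 C1 (u)))))) := by
        rw [rep_match K6 C6 _ (by decide) (List.prefix_append _ _), List.drop_left]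
      have e7 : rep K7 C7 (C6 ++ rep K6 C6 (rep K5 C5 (rep K4 C4 (rep K3 C3 (rep K2 C2 (rep K1 C1 (u))))))) = C6 ++ rep K7 C7 (rep K6 C6 (rep K5 C5 (rep K4 C4 (rep K3 C3 (rep K2 C2 (rep K1 C1 (u))))))) := skip_clean K7 C7 C6 (by decide) (by decide) _
      have e8 : rep K8 C8 (C6 ++ rep K7 C7 (rep K6 C6 (rep K5 C5 (rep K4 C4 (rep K3 C3 (rep K2 C2 (rep K1 C1 (u)))))))) = C6 ++ rep K8 C8 (rep K7 C7 (rep K6 C6 (rep K5 C5 (rep K4 C4 (rep K3 C3 (rep K2 C2 (rep K1 C1 (u)))))))) := skip_clean K8 C8 C6 (by decide) (by decide) _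
      have hscan : polishScan (K6 ++ u) = C6 ++ polishScan u := by
        rw [scan6 _ h1 h2 h3 h4 h5 (List.prefix_append _ _), List.drop_left]
      have hu := ih u hlen hgu
      unfold Acore at hu ⊢
      rw [e1, e2, e3, e4, e5, e6, e7, e8, hu, hscan]
    by_cases h7 : K7 <+: cs
    · rcases h7 with ⟨u, rfl⟩
      have hgu : Good u := Good_mono g (List.suffix_append K7 u).isInfix
      have hlen : u.length ≤ n := by simp [K7] at hn; omega
      have hw0 : ¬ ("efinately".toList <+: u) := by
        intro hc
        refine g.1 (List.IsPrefix.isInfix ?_)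
        rw [show "occuredefinately".toList = K7 ++ "efinately".toList from by decide]
        exact (List.prefix_append_right_inj K7).mpr hc
      have hw1 : ¬ ("efinately".toList <+: rep K1 C1 (u)) := fun hc => hw0 (pull_clean K1 C1 _ (by decide) (by decide) _ hc)
      have hw2 : ¬ ("efinately".toList <+: rep K2 C2 (rep K1 C1 (u))) := fun hc => hw1 (pull_clean K2 C2 _ (by decide) (by decide) _ hc)
      have hw3 : ¬ ("efinately".toList <+: rep K3 C3 (rep K2 C2 (rep K1 C1 (u)))) := fun hc => hw2 (pull_clean K3 C3 _ (by decide) (by decide) _ hc)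
      have hw4 : ¬ ("efinately".toList <+: rep K4 C4 (rep K3 C3 (rep K2 C2 (rep K1 C1 (u))))) := fun hc => hw3 (pull_clean K4 C4 _ (by decide) (by decide) _ hc)
      have hw5 : ¬ ("efinately".toList <+: rep K5 C5 (rep K4 C4 (rep K3 C3 (rep K2 C2 (rep K1 C1 (u)))))) := fun hc => hw4 (pull_clean K5 C5 _ (by decide) (by decide) _ hc)
      have e1 : rep K1 C1 (K7 ++ u) = K7 ++ rep K1 C1 (u) := skip_clean K1 C1 K7 (by decide) (by decide) _
      have e2 : rep K2 C2 (K7 ++ rep K1 C1 (u)) = K7 ++ rep K2 C2 (rep K1 C1 (u)) := skip_clean K2 C2 K7 (by decide) (by decide) _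
      have e3 : rep K3 C3 (K7 ++ rep K2 C2 (rep K1 C1 (u))) = K7 ++ rep K3 C3 (rep K2 C2 (rep K1 C1 (u))) := skip_clean K3 C3 K7 (by decide) (by decide) _
      have e4 : rep K4 C4 (K7 ++ rep K3 C3 (rep K2 C2 (rep K1 C1 (u)))) = K7 ++ rep K4 C4 (rep K3 C3 (rep K2 C2 (rep K1 C1 (u)))) := skip_clean K4 C4 K7 (by decide) (by decide) _
      have e5 : rep K5 C5 (K7 ++ rep K4 C4 (rep K3 C3 (rep K2 C2 (rep K1 C1 (u))))) = K7 ++ rep K5 C5 (rep K4 C4 (rep K3 C3 (rep K2 C2 (rep K1 C1 (u))))) := skip_clean K5 C5 K7 (by decide) (by decide) _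
      have e6 : rep K6 C6 (K7 ++ rep K5 C5 (rep K4 C4 (rep K3 C3 (rep K2 C2 (rep K1 C1 (u)))))) = K7 ++ rep K6 C6 (rep K5 C5 (rep K4 C4 (rep K3 C3 (rep K2 C2 (rep K1 C1 (u)))))) := skip_exc K6 C6 K7 ("efinately".toList) (by decide) (by decide) _ hw5
      have e7 : rep K7 C7 (K7 ++ rep K6 C6 (rep K5 C5 (rep K4 C4 (rep K3 C3 (rep K2 C2 (rep K1 C1 (u))))))) = C7 ++ rep K7 C7 (rep K6 C6 (rep K5 C5 (rep K4 C4 (rep K3 C3 (rep K2 C2 (rep K1 C1 (u))))))) := by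
        rw [rep_match K7 C7 _ (by decide) (List.prefix_append _ _), List.drop_left]
      have e8 : rep K8 C8 (C7 ++ rep K7 C7 (rep K6 C6 (rep K5 C5 (rep K4 C4 (rep K3 C3 (rep K2 C2 (rep K1 C1 (u)))))))) = C7 ++ rep K8 C8 (rep K7 C7 (rep K6 C6 (rep K5 C5 (rep K4 C4 (rep K3 C3 (rep K2 C2 (rep K1 C1 (u)))))))) := skip_clean K8 C8 C7 (by decide) (by decide) _
      have hscan : polishScan (K7 ++ u) = C7 ++ polishScan u := by
        rw [scan7 _ h1 h2 h3 h4 h5 h6 (List.prefix_append _ _), List.drop_left]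
      have hu := ih u hlen hgu
      unfold Acore at hu ⊢
      rw [e1, e2, e3, e4, e5, e6, e7, e8, hu, hscan]
    by_cases h8 : K8 <+: cs
    · rcases h8 with ⟨u, rfl⟩
      have hgu : Good u := Good_mono g (List.suffix_append K8 u).isInfix
      have hlen : u.length ≤ n := by simp [K8] at hn; omega
      have e1 : rep K1 C1 (K8 ++ u) = K8 ++ rep K1 C1 (u) := skip_clean K1 C1 K8 (by decide) (by decide) _
      have e2 : rep K2 C2 (K8 ++ rep K1 C1 (u)) = K8 ++ rep K2 C2 (rep K1 C1 (u)) := skip_clean K2 C2 K8 (by decide) (by decide) _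
      have e3 : rep K3 C3 (K8 ++ rep K2 C2 (rep K1 C1 (u))) = K8 ++ rep K3 C3 (rep K2 C2 (rep K1 C1 (u))) := skip_clean K3 C3 K8 (by decide) (by decide) _
      have e4 : rep K4 C4 (K8 ++ rep K3 C3 (rep K2 C2 (rep K1 C1 (u)))) = K8 ++ rep K4 C4 (rep K3 C3 (rep K2 C2 (rep K1 C1 (u)))) := skip_clean K4 C4 K8 (by decide) (by decide) _
      have e5 : rep K5 C5 (K8 ++ rep K4 C4 (rep K3 C3 (rep K2 C2 (rep K1 C1 (u))))) = K8 ++ rep K5 C5 (rep K4 C4 (rep K3 C3 (rep K2 C2 (rep K1 C1 (u))))) := skip_clean K5 C5 K8 (by decide) (by decide) _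
      have e6 : rep K6 C6 (K8 ++ rep K5 C5 (rep K4 C4 (rep K3 C3 (rep K2 C2 (rep K1 C1 (u)))))) = K8 ++ rep K6 C6 (rep K5 C5 (rep K4 C4 (rep K3 C3 (rep K2 C2 (rep K1 C1 (u)))))) := skip_clean K6 C6 K8 (by decide) (by decide) _
      have e7 : rep K7 C7 (K8 ++ rep K6 C6 (rep K5 C5 (rep K4 C4 (rep K3 C3 (rep K2 C2 (rep K1 C1 (u))))))) = K8 ++ rep K7 C7 (rep K6 C6 (rep K5 C5 (rep K4 C4 (rep K3 C3 (rep K2 C2 (rep K1 C1 (u))))))) := skip_clean K7 C7 K8 (by decide) (by decide) _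
      have e8 : rep K8 C8 (K8 ++ rep K7 C7 (rep K6 C6 (rep K5 C5 (rep K4 C4 (rep K3 C3 (rep K2 C2 (rep K1 C1 (u)))))))) = C8 ++ rep K8 C8 (rep K7 C7 (rep K6 C6 (rep K5 C5 (rep K4 C4 (rep K3 C3 (rep K2 C2 (rep K1 C1 (u)))))))) := by
        rw [rep_match K8 C8 _ (by decide) (List.prefix_append _ _), List.drop_left]
      have hscan : polishScan (K8 ++ u) = C8 ++ polishScan u := by
        rw [scan8 _ h1 h2 h3 h4 h5 h6 h7 (List.prefix_append _ _), List.drop_left]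
      have hu := ih u hlen hgu
      unfold Acore at hu ⊢
      rw [e1, e2, e3, e4, e5, e6, e7, e8, hu, hscan]
    cases cs with
    | nil =>
      unfold Acore
      rw [rep_nil K1 C1 (by decide), rep_nil K2 C2 (by decide), rep_nil K3 C3 (by decide), rep_nil K4 C4 (by decide), rep_nil K5 C5 (by decide), rep_nil K6 C6 (by decide), rep_nil K7 C7 (by decide), rep_nil K8 C8 (by decide), scan_nil]
    | cons a t =>
      have hgt : Good t := Good_mono g (List.suffix_cons a t).isInfix
      have hlen : t.length ≤ n := by simp at hn; omega
      have f1 : rep K1 C1 (a :: t) = a :: rep K1 C1 t := rep_step _ _ _ _ (by decide) h1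
      have n2 : ¬ K2 <+: a :: rep K1 C1 (t) := by
        intro hc
        rw [show K2 = 'S' :: "he have".toList from by decide, List.cons_prefix_cons] at hc
        have hp := hc.2
        have hp := pull_clean K1 C1 _ (by decide) (by decide) _ hp
        exact h2 (by
          rw [show K2 = 'S' :: "he have".toList from by decide, List.cons_prefix_cons]
          exact ⟨hc.1, hp⟩)
      have f2 : rep K2 C2 (a :: rep K1 C1 (t)) = a :: rep K2 C2 (rep K1 C1 (t)) := rep_step _ _ _ _ (by decide) n2
      have n3 : ¬ K3 <+: a :: rep K2 C2 (rep K1 C1 (t)) := by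
        intro hc
        rw [show K3 = 'I' :: "t have".toList from by decide, List.cons_prefix_cons] at hc
        have hp := hc.2
        have hp := pull_clean K2 C2 _ (by decide) (by decide) _ hp
        have hp := pull_clean K1 C1 _ (by decide) (by decide) _ hp
        exact h3 (by
          rw [show K3 = 'I' :: "t have".toList from by decide, List.cons_prefix_cons]
          exact ⟨hc.1, hp⟩)
      have f3 : rep K3 C3 (a :: rep K2 C2 (rep K1 C1 (t))) = a :: rep K3 C3 (rep K2 C2 (rep K1 C1 (t))) := rep_step _ _ _ _ (by decide) n3
      have n4 : ¬ K4 <+: a :: rep K3 C3 (rep K2 C2 (rep K1 C1 (t))) := by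
        intro hc
        rw [show K4 = 'r' :: "ecieve".toList from by decide, List.cons_prefix_cons] at hc
        have hp := hc.2
        have hp := pull_clean K3 C3 _ (by decide) (by decide) _ hp
        have hp := pull_clean K2 C2 _ (by decide) (by decide) _ hp
        have hp := pull_clean K1 C1 _ (by decide) (by decide) _ hp
        exact h4 (by
          rw [show K4 = 'r' :: "ecieve".toList from by decide, List.cons_prefix_cons]
          exact ⟨hc.1, hp⟩)
      have f4 : rep K4 C4 (a :: rep K3 C3 (rep K2 C2 (rep K1 C1 (t)))) = a :: rep K4 C4 (rep K3 C3 (rep K2 C2 (rep K1 C1 (t)))) := rep_step _ _ _ _ (by decide) n4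
      have n5 : ¬ K5 <+: a :: rep K4 C4 (rep K3 C3 (rep K2 C2 (rep K1 C1 (t)))) := by
        intro hc
        rw [show K5 = 's' :: "eperate".toList from by decide, List.cons_prefix_cons] at hc
        have hp := hc.2
        have hp := pull_clean K4 C4 _ (by decide) (by decide) _ hp
        have hp := pull_clean K3 C3 _ (by decide) (by decide) _ hp
        have hp := pull_clean K2 C2 _ (by decide) (by decide) _ hp
        have hp := pull_clean K1 C1 _ (by decide) (by decide) _ hp
        exact h5 (by
          rw [show K5 = 's' :: "eperate".toList from by decide, List.cons_prefix_cons]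
          exact ⟨hc.1, hp⟩)
      have f5 : rep K5 C5 (a :: rep K4 C4 (rep K3 C3 (rep K2 C2 (rep K1 C1 (t))))) = a :: rep K5 C5 (rep K4 C4 (rep K3 C3 (rep K2 C2 (rep K1 C1 (t))))) := rep_step _ _ _ _ (by decide) n5
      have n6 : ¬ K6 <+: a :: rep K5 C5 (rep K4 C4 (rep K3 C3 (rep K2 C2 (rep K1 C1 (t))))) := by
        intro hc
        rw [show K6 = 'd' :: "efinately".toList from by decide, List.cons_prefix_cons] at hc
        have hp := hc.2
        have hp := pull_clean K5 C5 _ (by decide) (by decide) _ hp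
        have hp := pull_clean K4 C4 _ (by decide) (by decide) _ hp
        have hp := pull_clean K3 C3 _ (by decide) (by decide) _ hp
        have hp := pull_clean K2 C2 _ (by decide) (by decide) _ hp
        have hp := pull_clean K1 C1 _ (by decide) (by decide) _ hp
        exact h6 (by
          rw [show K6 = 'd' :: "efinately".toList from by decide, List.cons_prefix_cons]
          exact ⟨hc.1, hp⟩)
      have f6 : rep K6 C6 (a :: rep K5 C5 (rep K4 C4 (rep K3 C3 (rep K2 C2 (rep K1 C1 (t)))))) = a :: rep K6 C6 (rep K5 C5 (rep K4 C4 (rep K3 C3 (rep K2 C2 (rep K1 C1 (t)))))) := rep_step _ _ _ _ (by decide) n6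
      have n7 : ¬ K7 <+: a :: rep K6 C6 (rep K5 C5 (rep K4 C4 (rep K3 C3 (rep K2 C2 (rep K1 C1 (t)))))) := by
        intro hc
        rw [show K7 = 'o' :: "ccured".toList from by decide, List.cons_prefix_cons] at hc
        rcases pull_exc K6 C6 ("ccured".toList) ("ccuredefinately".toList) (by decide) (by decide) _ hc.2 with hp | hp
        all_goals have hp := pull_clean K5 C5 _ (by decide) (by decide) _ hp
        all_goals have hp := pull_clean K4 C4 _ (by decide) (by decide) _ hp
        all_goals have hp := pull_clean K3 C3 _ (by decide) (by decide) _ hp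
        all_goals have hp := pull_clean K2 C2 _ (by decide) (by decide) _ hp
        all_goals have hp := pull_clean K1 C1 _ (by decide) (by decide) _ hp
        case inl =>
          exact h7 (by
            rw [show K7 = 'o' :: "ccured".toList from by decide, List.cons_prefix_cons]
            exact ⟨hc.1, hp⟩)
        case inr =>
          refine g.1 (List.IsPrefix.isInfix ?_)
          rw [show "occuredefinately".toList = 'o' :: "ccuredefinately".toList from by decide, List.cons_prefix_cons]
          exact ⟨hc.1, hp⟩
      have f7 : rep K7 C7 (a :: rep K6 C6 (rep K5 C5 (rep K4 C4 (rep K3 C3 (rep K2 C2 (rep K1 C1 (t))))))) = a :: rep K7 C7 (rep K6 C6 (rep K5 C5 (rep K4 C4 (rep K3 C3 (rep K2 C2 (rep K1 C1 (t))))))) := rep_step _ _ _ _ (by decide) n7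
      have n8 : ¬ K8 <+: a :: rep K7 C7 (rep K6 C6 (rep K5 C5 (rep K4 C4 (rep K3 C3 (rep K2 C2 (rep K1 C1 (t))))))) := by
        intro hc
        rw [show K8 = 'u' :: "ntill".toList from by decide, List.cons_prefix_cons] at hc
        have hp := hc.2
        have hp := pull_clean K7 C7 _ (by decide) (by decide) _ hp
        have hp := pull_clean K6 C6 _ (by decide) (by decide) _ hp
        have hp := pull_clean K5 C5 _ (by decide) (by decide) _ hp
        have hp := pull_clean K4 C4 _ (by decide) (by decide) _ hp
        have hp := pull_clean K3 C3 _ (by decide) (by decide) _ hp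
        have hp := pull_clean K2 C2 _ (by decide) (by decide) _ hp
        have hp := pull_clean K1 C1 _ (by decide) (by decide) _ hp
        exact h8 (by
          rw [show K8 = 'u' :: "ntill".toList from by decide, List.cons_prefix_cons]
          exact ⟨hc.1, hp⟩)
      have f8 : rep K8 C8 (a :: rep K7 C7 (rep K6 C6 (rep K5 C5 (rep K4 C4 (rep K3 C3 (rep K2 C2 (rep K1 C1 (t)))))))) = a :: rep K8 C8 (rep K7 C7 (rep K6 C6 (rep K5 C5 (rep K4 C4 (rep K3 C3 (rep K2 C2 (rep K1 C1 (t)))))))) := rep_step _ _ _ _ (by decide) n8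
      have hu := ih t hlen hgt
      unfold Acore at hu ⊢
      rw [f1, f2, f3, f4, f5, f6, f7, f8, hu, scan_char a t h1 h2 h3 h4 h5 h6 h7 h8]

theorem A_toList (text : String) (errors : List (List (String × String))) :
    (polish_text text errors).toList = Acore text.toList := by
  have hitems : PySem.Dict.items (PySem.Dict.ofList
      [("He have", "He has"), ("She have", "She has"), ("It have", "It has"),
       ("recieve", "receive"), ("seperate", "separate"), ("definately", "definitely"),
       ("occured", "occurred"), ("untill", "until")]) =
      [("He have", "He has"), ("She have", "She has"), ("It have", "It has"),
       ("recieve", "receive"), ("seperate", "separate"), ("definately", "definitely"),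
       ("occured", "occurred"), ("untill", "until")] := by decide
  simp only [polish_text, hitems, List.foldl]
  simp only [PySem.Str.toList_replace]
  simp [Acore, rep, K1, K2, K3, K4, K5, K6, K7, K8, C1, C2, C3, C4, C5, C6, C7, C8]

-- ===== VERDICT (by name: the statement is the Claim_ definition above) =====
theorem polish_text_spec : Claim_equal_polish_text := by
  intro text errors _hdom hpre
  unfold Spec_polish_text polish_text_alt
  have hgood : Good text.toList := by
    obtain ⟨h1, h2, h3, h4⟩ := hpre
    refine ⟨?_, ?_, ?_, ?_⟩ <;>
      [skip; skip; skip; skip] <;>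
      · intro hc
        first
          | exact absurd ((PySem.Str.isIn_iff_infix _ _).mpr hc) (by simp_all)
  have h : (polish_text text errors).toList = polishScan text.toList :=
    (A_toList text errors).trans (main text.toList.length text.toList (le_refl _) hgood)
  rw [← h, String.ofList_toList]
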